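-- pv_equiv track=rewrite | github.com/moulydewan/unified-retrieval-eval | src/evaluation/eval_rag.py | merge_dedup_ranking
-- ===== SOURCE A (Python) =====
-- from typing import Any, Dict, List, Optional, Tuple
--
-- def merge_dedup_ranking(items: List[Tuple[int, str, str]]) -> Tuple[List[str], List[str]]:
--     """
--     Standard IR ranking:
--       - sort by rank (already sorted upstream, but kept safe)
--       - deduplicate docids (keep first occurrence)
--     Returns:
--       ranked_docids, ranked_texts (aligned to the kept docids)
--     """
--     items = sorted(items, key=lambda x: x[0])
--     seen = set()
--     docids: List[str] = []
--     texts: List[str] = []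
--     for _, docid, txt in items:
--         if not docid:
--             continue
--         if docid in seen:
--             continue
--         seen.add(docid)
--         docids.append(docid)
--         texts.append(txt or "")
--     return docids, texts
-- ===== SOURCE B (Python) =====
-- def merge_dedup_ranking(items):
--     # One pass: for each non-empty docid keep the occurrence minimizing (rank, index);
--     # then sort only the unique entries by (rank, index) and split into the two lists.
--     best = {}
--     for idx, (rank, docid, txt) in enumerate(items):
--         if not docid:
--             continue
--         cur = best.get(docid)
--         if cur is None or (rank, idx) < (cur[0], cur[1]):
--             best[docid] = (rank, idx, txt or "")
--     entries = sorted(best.items(), key=lambda kv: (kv[1][0], kv[1][1]))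
--     return [d for d, _ in entries], [v[2] for _, v in entries]
-- ===== Notes on version B (the rewrite author's own statement) =====
-- stated objective: alternative
-- what changed: Instead of stably sorting all items and then linearly deduplicating with a seen-set, B makes one pass in original order building a dict that keeps, per non-empty docid, the occurrence minimizing (rank, index), then sorts only the unique entries by (rank, index) and splits them into the two lists.
import Mathlib
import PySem

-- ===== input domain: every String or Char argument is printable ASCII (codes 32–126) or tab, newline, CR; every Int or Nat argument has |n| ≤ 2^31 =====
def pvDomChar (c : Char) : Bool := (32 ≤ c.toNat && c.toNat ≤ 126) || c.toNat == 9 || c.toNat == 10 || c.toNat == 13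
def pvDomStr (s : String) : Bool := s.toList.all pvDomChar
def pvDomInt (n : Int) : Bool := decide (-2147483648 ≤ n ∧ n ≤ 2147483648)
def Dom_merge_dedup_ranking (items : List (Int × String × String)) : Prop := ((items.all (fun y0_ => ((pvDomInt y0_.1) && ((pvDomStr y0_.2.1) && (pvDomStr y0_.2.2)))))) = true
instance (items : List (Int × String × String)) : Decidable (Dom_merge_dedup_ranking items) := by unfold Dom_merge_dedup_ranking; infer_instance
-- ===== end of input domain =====

-- B replaces A's stable-sort-all-then-dedup by a single original-order pass that keeps,
-- per non-empty docid, the occurrence minimizing (rank, index), and then sorts only the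
-- unique entries (objective: alternative decomposition, same observable result).

-- ===== PORT A =====
def merge_dedup_ranking (items : List (Int × String × String)) : List String × List String :=
  -- items = sorted(items, key=lambda x: x[0])
  let sortedItems := PySem.List.sorted items (fun x => x.1) false
  -- for _, docid, txt in items: …  (state = (seen, docids, texts))
  let st := sortedItems.foldl
    (fun (acc : PySem.Set String × List String × List String) x =>
      if x.2.1 = "" then acc                                  -- if not docid: continue
      else if PySem.Set.contains acc.1 x.2.1 then acc         -- if docid in seen: continue
      else (PySem.Set.add acc.1 x.2.1,
            acc.2.1 ++ [x.2.1],
            acc.2.2 ++ [if x.2.2 = "" then "" else x.2.2]))   -- texts.append(txt or "")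
    (PySem.Set.empty, [], [])
  (st.2.1, st.2.2)

-- ===== PORT B =====
def merge_dedup_ranking_alt (items : List (Int × String × String)) : List String × List String :=
  -- for idx, (rank, docid, txt) in enumerate(items): …
  let best := (PySem.List.enumerate items 0).foldl
    (fun (b : PySem.Dict String (Int × Int × String)) p =>
      if p.2.2.1 = "" then b                                  -- if not docid: continue
      else match b.get? p.2.2.1 with                          -- cur = best.get(docid)
        | none => b.insert p.2.2.1 (p.2.1, p.1, if p.2.2.2 = "" then "" else p.2.2.2)
        | some cur =>
            if p.2.1 < cur.1 ∨ (p.2.1 = cur.1 ∧ p.1 < cur.2.1)   -- (rank, idx) < (cur[0], cur[1])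
            then b.insert p.2.2.1 (p.2.1, p.1, if p.2.2.2 = "" then "" else p.2.2.2)
            else b)
    PySem.Dict.empty
  -- entries = sorted(best.items(), key=lambda kv: (kv[1][0], kv[1][1]))
  let entries := PySem.List.sorted2 best.items (fun kv => kv.2.1) (fun kv => kv.2.2.1) false
  (entries.map (fun kv => kv.1), entries.map (fun kv => kv.2.2.2))

-- ===== PRECONDITION & SPEC =====
def Spec_merge_dedup_ranking (items : List (Int × String × String)) (out : List String × List String) : Prop := out = merge_dedup_ranking_alt items
instance (items : List (Int × String × String)) (out : List String × List String) : Decidable (Spec_merge_dedup_ranking items out) := by unfold Spec_merge_dedup_ranking; infer_instance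

-- ===== CLAIM (what is proved, stated in full; the proofs are below) =====
def Claim_equal_merge_dedup_ranking : Prop := ∀ (items : List (Int × String × String)), Dom_merge_dedup_ranking items → Spec_merge_dedup_ranking items (merge_dedup_ranking items)

-- ===== LEMMAS AND PROOFS =====

-- Abbreviations for the tagged (index, (rank, docid, txt)) view used throughout the proof.
def pvDid (p : Int × Int × String × String) : String := p.2.2.1
def pvVal (p : Int × Int × String × String) : Int × Int × String :=
  (p.2.1, p.1, if p.2.2.2 = "" then "" else p.2.2.2)
-- strict lexicographic order on (rank, index)
def pvLex (a b : Int × Int × String × String) : Prop :=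
  a.2.1 < b.2.1 ∨ (a.2.1 = b.2.1 ∧ a.1 < b.1)
-- combined integer sort key (proof-side only): rank * M + index
def pvK (M : Int) (p : Int × Int × String × String) : Int := p.2.1 * M + p.1
def pvKkv (M : Int) (kv : String × Int × Int × String) : Int := kv.2.1 * M + kv.2.2.1

-- keep-first-by-docid scan (tagged view of A's dedup loop), and its final seen-set
def pvKf : List (Int × Int × String × String) → PySem.Set String → List (Int × Int × String × String)
  | [], _ => []
  | x :: l, seen =>
      if x.2.2.1 = "" then pvKf l seen
      else if PySem.Set.contains seen x.2.2.1 then pvKf l seen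
      else x :: pvKf l (PySem.Set.add seen x.2.2.1)
def pvKfS : List (Int × Int × String × String) → PySem.Set String → PySem.Set String
  | [], seen => seen
  | x :: l, seen =>
      if x.2.2.1 = "" then pvKfS l seen
      else if PySem.Set.contains seen x.2.2.1 then pvKfS l seen
      else pvKfS l (PySem.Set.add seen x.2.2.1)

-- running (rank, index)-lexicographic argmin among occurrences of docid d
def pvAmin (l : List (Int × Int × String × String)) (d : String) : Option (Int × Int × String × String) :=
  l.foldl (fun c p =>
    if pvDid p ≠ d then c
    else match c with
      | none => some p
      | some q => if p.2.1 < q.2.1 ∨ (p.2.1 = q.2.1 ∧ p.1 < q.1) then some p else c) none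

-- "x is the occurrence B keeps for docid d"
def pvBest (items : List (Int × String × String)) (d : String) (x : Int × Int × String × String) : Prop :=
  x ∈ PySem.List.enumerate items 0 ∧ pvDid x = d ∧ d ≠ "" ∧
    ∀ y ∈ PySem.List.enumerate items 0, pvDid y = d → y = x ∨ pvLex x y

-- the canonical list: keep-first over the (rank, index)-sorted tagged items
def pvLexS (items : List (Int × String × String)) : List (Int × Int × String × String) :=
  PySem.List.sorted (PySem.List.enumerate items 0) (pvK ((items.length : Int) + 1)) false
def pvE (items : List (Int × String × String)) : List (String × Int × Int × String) :=
  (pvKf (pvLexS items) []).map (fun p => (pvDid p, pvVal p))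

-- arithmetic core: rank * M + index is lexicographic for 0 ≤ index < M
lemma pvKlt_iff (r s i j M : Int) (hi : 0 ≤ i) (hiM : i < M) (hj : 0 ≤ j) (hjM : j < M) :
    r * M + i < s * M + j ↔ r < s ∨ (r = s ∧ i < j) := by
  rcases lt_trichotomy r s with h | h | h
  · constructor
    · intro _; exact Or.inl h
    · intro _
      have h1 : r + 1 ≤ s := h
      nlinarith [mul_le_mul_of_nonneg_right h1 (le_of_lt (lt_of_le_of_lt hi hiM))]
  · subst h; constructor
    · intro hlt; right; exact ⟨rfl, by omega⟩
    · rintro (h | ⟨-, h⟩); · omega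
      · omega
  · constructor
    · intro hlt
      have h1 : s + 1 ≤ r := h
      nlinarith [mul_le_mul_of_nonneg_right h1 (le_of_lt (lt_of_le_of_lt hi hiM))]
    · rintro (h2 | ⟨h2, -⟩) <;> omega

lemma pvLex_trans {a b c : Int × Int × String × String} (h1 : pvLex a b) (h2 : pvLex b c) : pvLex a c := by
  unfold pvLex at *; omega
lemma pvLex_asymm {a b : Int × Int × String × String} (h1 : pvLex a b) (h2 : pvLex b a) : False := by
  unfold pvLex at *; omega

-- insertBy commutes with a map when the comparators agree on the inserted element vs. members
lemma pvInsertBy_map {α β : Type} (f : α → β) (bef : α → α → Bool) (bef' : β → β → Bool)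
    (x : α) (acc : List α) (h : ∀ q ∈ acc, bef x q = bef' (f x) (f q)) :
    (PySem.List.insertBy bef x acc).map f = PySem.List.insertBy bef' (f x) (acc.map f) := by
  induction acc with
  | nil => simp [PySem.List.insertBy]
  | cons y ys ih =>
    have hy := h y (by simp)
    simp only [PySem.List.insertBy, List.map_cons, ← hy]
    by_cases hb : bef x y
    · simp [hb]
    · simp only [hb, if_neg (by simp [hb] : ¬ (bef x y = true))]
      simp [ih (fun q hq => h q (by simp [hq]))]

lemma pvInsertBy_congr {α : Type} (bef bef' : α → α → Bool) (x : α) (acc : List α)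
    (h : ∀ q ∈ acc, bef x q = bef' x q) :
    PySem.List.insertBy bef x acc = PySem.List.insertBy bef' x acc := by
  induction acc with
  | nil => rfl
  | cons y ys ih =>
    have hy := h y (by simp)
    simp only [PySem.List.insertBy, hy]
    by_cases hb : bef' x y
    · simp [hb]
    · simp [hb, ih (fun q hq => h q (by simp [hq]))]

lemma pvFoldl_insertBy_congr {α : Type} (bef bef' : α → α → Bool) :
    ∀ (l acc : List α), (∀ a ∈ l, ∀ b, b ∈ l ∨ b ∈ acc → bef a b = bef' a b) →
    l.foldl (fun acc x => PySem.List.insertBy bef x acc) acc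
      = l.foldl (fun acc x => PySem.List.insertBy bef' x acc) acc := by
  intro l
  induction l with
  | nil => intro acc _; rfl
  | cons a l ih =>
    intro acc h
    simp only [List.foldl_cons]
    rw [pvInsertBy_congr bef bef' a acc (fun q hq => h a (by simp) q (Or.inr hq))]
    apply ih
    intro p hp b hb
    apply h p (by simp [hp])
    rcases hb with hb | hb
    · exact Or.inl (by simp [hb])
    · rcases (PySem.List.mem_insertBy _ _ _ _).1 hb with hb | hb
      · exact Or.inl (by simp [hb])
      · exact Or.inr hb

-- stability: sorting the tagged list by rank*M+index and dropping the tags is A's stable sort by rank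
lemma pvStab_fold (l : List (Int × String × String)) :
    ∀ (s M : Int) (acc : List (Int × Int × String × String)), 0 ≤ s → s + l.length ≤ M →
    (∀ q ∈ acc, 0 ≤ q.1 ∧ q.1 < s) →
    ((PySem.List.enumerate l s).foldl
        (fun a x => PySem.List.insertBy (fun a b => decide (pvK M a < pvK M b)) x a) acc).map Prod.snd
      = l.foldl (fun a x => PySem.List.insertBy (fun a b => decide (a.1 < b.1)) x a) (acc.map Prod.snd) := by
  induction l with
  | nil => intro s M acc _ _ _; simp [PySem.List.enumerate]
  | cons x l ih =>
    intro s M acc hs hM hacc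
    rw [PySem.List.enumerate_cons]
    simp only [List.foldl_cons, List.length_cons] at *
    have hmap : (PySem.List.insertBy (fun a b => decide (pvK M a < pvK M b)) (s, x) acc).map Prod.snd
        = PySem.List.insertBy (fun a b => decide (a.1 < b.1)) x (acc.map Prod.snd) := by
      apply pvInsertBy_map
      intro q hq
      have hb := hacc q hq
      have hsM : s < M := by omega
      have := pvKlt_iff x.1 q.2.1 s q.1 M hs hsM (by omega) (by omega)
      simp only [pvK] at *
      rw [decide_eq_decide]
      rw [this]
      omega
    rw [← hmap]
    apply ih (s + 1) M _ (by omega) (by omega)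
    intro q hq
    rcases (PySem.List.mem_insertBy _ _ _ _).1 hq with hq | hq
    · subst hq; constructor <;> simp <;> omega
    · have := hacc q hq; omega

lemma pvStability (items : List (Int × String × String)) :
    (pvLexS items).map Prod.snd = PySem.List.sorted items (fun x => x.1) false := by
  unfold pvLexS
  rw [PySem.List.sorted_eq_foldl_insertBy, PySem.List.sorted_eq_foldl_insertBy]
  have := pvStab_fold items 0 ((items.length : Int) + 1) [] (by omega) (by omega) (by simp)
  simpa using this

-- A's dedup loop is the keep-first scan
lemma pvA_fold (l : List (Int × Int × String × String)) :
    ∀ (seen : PySem.Set String) (ds ts : List String),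
    l.foldl (fun (acc : PySem.Set String × List String × List String) p =>
        if p.2.2.1 = "" then acc
        else if PySem.Set.contains acc.1 p.2.2.1 then acc
        else (PySem.Set.add acc.1 p.2.2.1, acc.2.1 ++ [p.2.2.1],
              acc.2.2 ++ [if p.2.2.2 = "" then "" else p.2.2.2])) (seen, ds, ts)
      = (pvKfS l seen, ds ++ (pvKf l seen).map pvDid,
         ts ++ (pvKf l seen).map (fun p => if p.2.2.2 = "" then "" else p.2.2.2)) := by
  induction l with
  | nil => intro seen ds ts; simp [pvKf, pvKfS]
  | cons x l ih =>
    intro seen ds ts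
    simp only [List.foldl_cons, pvKf, pvKfS]
    by_cases h1 : x.2.2.1 = ""
    · simp only [h1, if_pos rfl, if_true]
      exact ih seen ds ts
    · simp only [if_neg h1]
      by_cases h2 : PySem.Set.contains seen x.2.2.1
      · simp only [h2, if_true]
        exact ih seen ds ts
      · simp only [h2, if_false, Bool.false_eq_true]
        rw [ih (PySem.Set.add seen x.2.2.1) (ds ++ [x.2.2.1])
              (ts ++ [if x.2.2.2 = "" then "" else x.2.2.2])]
        simp [pvDid]

-- keep-first facts
lemma pvKf_sublist (l : List (Int × Int × String × String)) (seen : PySem.Set String) :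
    (pvKf l seen).Sublist l := by
  induction l generalizing seen with
  | nil => simp [pvKf]
  | cons x l ih =>
    simp only [pvKf]
    split_ifs with h1 h2
    · exact (ih seen).cons x
    · exact (ih seen).cons x
    · exact (ih _).cons₂ x

lemma pvKf_mem_iff (l : List (Int × Int × String × String)) (hp : l.Pairwise pvLex)
    (seen : PySem.Set String) (x : Int × Int × String × String) :
    x ∈ pvKf l seen ↔ x ∈ l ∧ pvDid x ≠ "" ∧ pvDid x ∉ seen ∧
      ∀ y ∈ l, pvDid y = pvDid x → y = x ∨ pvLex x y := by
  induction l generalizing seen with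
  | nil => simp [pvKf]
  | cons z l ih =>
    rcases List.pairwise_cons.1 hp with ⟨hz, hl⟩
    simp only [pvKf]
    split_ifs with h1 h2
    · -- docid z empty: z is never x, never a competitor
      rw [ih hl seen]
      constructor
      · rintro ⟨hxl, hne, hns, hmin⟩
        refine ⟨List.mem_cons_of_mem _ hxl, hne, hns, ?_⟩
        intro y hy hdy
        rcases List.mem_cons.1 hy with rfl | hy
        · exact absurd (hdy.symm.trans h1) hne
        · exact hmin y hy hdy
      · rintro ⟨hxl, hne, hns, hmin⟩
        have hxl' : x ∈ l := by
          rcases List.mem_cons.1 hxl with rfl | h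
          · exact absurd h1 (by simpa [pvDid] using hne)
          · exact h
        exact ⟨hxl', hne, hns, fun y hy hdy => hmin y (List.mem_cons_of_mem _ hy) hdy⟩
    · -- docid z already seen
      have hzs : z.2.2.1 ∈ seen := (PySem.Set.contains_iff _ _).1 h2
      rw [ih hl seen]
      constructor
      · rintro ⟨hxl, hne, hns, hmin⟩
        refine ⟨List.mem_cons_of_mem _ hxl, hne, hns, ?_⟩
        intro y hy hdy
        rcases List.mem_cons.1 hy with rfl | hy
        · exact absurd (hdy ▸ hzs) hns
        · exact hmin y hy hdy
      · rintro ⟨hxl, hne, hns, hmin⟩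
        have hxl' : x ∈ l := by
          rcases List.mem_cons.1 hxl with rfl | h
          · exact absurd hzs hns
          · exact h
        exact ⟨hxl', hne, hns, fun y hy hdy => hmin y (List.mem_cons_of_mem _ hy) hdy⟩
    · -- z is kept
      have hzs : z.2.2.1 ∉ seen := fun hc => h2 ((PySem.Set.contains_iff _ _).2 hc)
      rw [List.mem_cons, ih hl (PySem.Set.add seen z.2.2.1)]
      constructor
      · rintro (rfl | ⟨hxl, hne, hns, hmin⟩)
        · refine ⟨List.mem_cons_self, h1, hzs, ?_⟩
          intro y hy hdy
          rcases List.mem_cons.1 hy with rfl | hy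
          · exact Or.inl rfl
          · exact Or.inr (hz y hy)
        · have hnsz : pvDid x ≠ z.2.2.1 := by
            intro hc
            exact hns ((PySem.Set.mem_add _ _ _).2 (Or.inr hc))
          have hns' : pvDid x ∉ seen := by
            intro hc
            exact hns ((PySem.Set.mem_add _ _ _).2 (Or.inl hc))
          refine ⟨List.mem_cons_of_mem _ hxl, hne, hns', ?_⟩
          intro y hy hdy
          rcases List.mem_cons.1 hy with rfl | hy
          · exact absurd hdy (by simpa [pvDid] using hnsz ∘ Eq.symm)
          · exact hmin y hy hdy
      · rintro ⟨hxl, hne, hns, hmin⟩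
        rcases List.mem_cons.1 hxl with rfl | hxl'
        · exact Or.inl rfl
        · by_cases hxz : x = z
          · exact Or.inl hxz
          · right
            have hdxz : pvDid x ≠ z.2.2.1 := by
              intro hc
              rcases hmin z List.mem_cons_self (by simpa [pvDid] using hc.symm) with h | h
              · exact hxz h.symm
              · exact pvLex_asymm h (hz x hxl')
            refine ⟨hxl', hne, ?_, fun y hy hdy => hmin y (List.mem_cons_of_mem _ hy) hdy⟩
            intro hc
            rcases (PySem.Set.mem_add _ _ _).1 hc with hc | hc
            · exact hns hc
            · exact hdxz hc

lemma pvKf_not_seen (l : List (Int × Int × String × String)) :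
    ∀ (seen : PySem.Set String) (x : _), x ∈ pvKf l seen → pvDid x ∉ seen := by
  induction l with
  | nil => intro seen x hx; simp [pvKf] at hx
  | cons z l ih =>
    intro seen x hx
    simp only [pvKf] at hx
    split_ifs at hx with h1 h2
    · exact ih seen x hx
    · exact ih seen x hx
    · rcases List.mem_cons.1 hx with rfl | hx
      · intro hc
        exact h2 ((PySem.Set.contains_iff _ _).2 hc)
      · intro hc
        exact ih _ x hx ((PySem.Set.mem_add _ _ _).2 (Or.inl hc))

lemma pvKf_did_nodup (l : List (Int × Int × String × String)) :
    ∀ (seen : PySem.Set String), ((pvKf l seen).map pvDid).Nodup := by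
  induction l with
  | nil => intro seen; simp [pvKf]
  | cons z l ih =>
    intro seen
    simp only [pvKf]
    split_ifs with h1 h2
    · exact ih seen
    · exact ih seen
    · simp only [List.map_cons, List.nodup_cons]
      refine ⟨?_, ih _⟩
      intro hc
      rcases List.mem_map.1 hc with ⟨x, hx, hdx⟩
      have := pvKf_not_seen l _ x hx
      exact this ((PySem.Set.mem_add _ _ _).2 (Or.inr (by simpa [pvDid] using hdx)))

-- tagged-list facts
lemma pvTg_pairwise (items : List (Int × String × String)) :
    (PySem.List.enumerate items 0).Pairwise (fun a b => a.1 < b.1) := by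
  have h := PySem.List.pairwise_lt_pyRange_one 0 (0 + (items.length : Int))
  rw [← PySem.List.map_fst_enumerate items 0] at h
  exact List.pairwise_map.1 h

lemma pvTg_ix_bound (items : List (Int × String × String)) (x : Int × Int × String × String)
    (hx : x ∈ PySem.List.enumerate items 0) : 0 ≤ x.1 ∧ x.1 < (items.length : Int) := by
  have h : x.1 ∈ (PySem.List.enumerate items 0).map (fun p => p.1) := List.mem_map_of_mem hx
  rw [PySem.List.map_fst_enumerate] at h
  have := (PySem.List.mem_pyRange_one (a := 0) (b := 0 + (items.length : Int)) (x := x.1)).1 h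
  omega

-- pairwise (rank, index)-lex of the canonical sort
lemma pvLexS_pairwise (items : List (Int × String × String)) :
    (pvLexS items).Pairwise pvLex := by
  have hle : (pvLexS items).Pairwise (fun a b => pvK ((items.length : Int) + 1) a ≤ pvK ((items.length : Int) + 1) b) :=
    PySem.List.sorted_pairwise _ _
  have hperm : (pvLexS items).Perm (PySem.List.enumerate items 0) := PySem.List.sorted_perm _ _ _
  have hnd : ((pvLexS items).map (fun p => p.1)).Nodup := by
    refine (hperm.map (fun p => p.1)).nodup_iff.2 ?_
    rw [PySem.List.map_fst_enumerate]
    exact PySem.List.nodup_pyRange_one _ _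
  have hne : (pvLexS items).Pairwise (fun a b => a.1 ≠ b.1) := by
    rw [List.Nodup, List.pairwise_map] at hnd
    exact hnd
  refine (hle.and hne).imp_of_mem ?_
  intro a b ha hb hab
  have hba := pvTg_ix_bound items a ((PySem.List.mem_sorted _ _ _ _).1 ha)
  have hbb := pvTg_ix_bound items b ((PySem.List.mem_sorted _ _ _ _).1 hb)
  have hiff := pvKlt_iff b.2.1 a.2.1 b.1 a.1 ((items.length : Int) + 1)
    (by omega) (by omega) (by omega) (by omega)
  rcases hab with ⟨hK, hne'⟩
  simp only [pvK] at hK hiff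
  unfold pvLex
  omega

-- dict-side: get? of the fold is a per-key fold
lemma pvDict_get?_fold (l : List (Int × Int × String × String)) :
    ∀ (b : PySem.Dict String (Int × Int × String)) (d : String),
    (l.foldl (fun (b : PySem.Dict String (Int × Int × String)) p =>
        if p.2.2.1 = "" then b
        else match b.get? p.2.2.1 with
          | none => b.insert p.2.2.1 (p.2.1, p.1, if p.2.2.2 = "" then "" else p.2.2.2)
          | some cur =>
              if p.2.1 < cur.1 ∨ (p.2.1 = cur.1 ∧ p.1 < cur.2.1)
              then b.insert p.2.2.1 (p.2.1, p.1, if p.2.2.2 = "" then "" else p.2.2.2)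
              else b) b).get? d
      = l.foldl (fun c p =>
          if pvDid p = "" ∨ pvDid p ≠ d then c
          else match c with
            | none => some (pvVal p)
            | some cur =>
                if p.2.1 < cur.1 ∨ (p.2.1 = cur.1 ∧ p.1 < cur.2.1)
                then some (pvVal p) else cur) (b.get? d) := by
  induction l with
  | nil => intro b d; rfl
  | cons p l ih =>
    intro b d
    simp only [List.foldl_cons]
    rw [ih]
    congr 1
    by_cases h1 : p.2.2.1 = ""
    · simp [h1, pvDid]
    · simp only [if_neg h1, pvDid]
      have hmatch : ¬ (p.2.2.1 = "" ∨ p.2.2.1 ≠ d) ↔ d = p.2.2.1 := by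
        constructor
        · intro h; by_contra hc; exact h (Or.inr (fun he => hc he.symm))
        · rintro rfl; push_neg; exact ⟨h1, rfl⟩
      rcases hg : b.get? p.2.2.1 with _ | cur <;> dsimp only [pvVal]
      · by_cases hd : d = p.2.2.1
        · subst hd
          rw [PySem.Dict.get?_insert_self, if_neg (hmatch.2 rfl), hg]
        · rw [PySem.Dict.get?_insert_of_ne _ _ hd,
              if_pos (Or.inr fun he => hd he.symm)]
      · by_cases hd : d = p.2.2.1
        · subst hd
          rw [if_neg (hmatch.2 rfl), hg]
          dsimp only
          by_cases hcond : p.2.1 < cur.1 ∨ p.2.1 = cur.1 ∧ p.1 < cur.2.1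
          · rw [if_pos hcond, if_pos hcond, PySem.Dict.get?_insert_self]
          · rw [if_neg hcond, if_neg hcond]; exact hg
        · rw [if_pos (Or.inr fun he => hd he.symm)]
          by_cases hcond : p.2.1 < cur.1 ∨ p.2.1 = cur.1 ∧ p.1 < cur.2.1
          · rw [if_pos hcond, PySem.Dict.get?_insert_of_ne _ _ hd]
          · rw [if_neg hcond]

lemma pvDict_keys_nodup (l : List (Int × Int × String × String)) :
    ∀ (b : PySem.Dict String (Int × Int × String)), b.keys.Nodup →
    (l.foldl (fun (b : PySem.Dict String (Int × Int × String)) p =>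
        if p.2.2.1 = "" then b
        else match b.get? p.2.2.1 with
          | none => b.insert p.2.2.1 (p.2.1, p.1, if p.2.2.2 = "" then "" else p.2.2.2)
          | some cur =>
              if p.2.1 < cur.1 ∨ (p.2.1 = cur.1 ∧ p.1 < cur.2.1)
              then b.insert p.2.2.1 (p.2.1, p.1, if p.2.2.2 = "" then "" else p.2.2.2)
              else b) b).keys.Nodup := by
  induction l with
  | nil => intro b hb; exact hb
  | cons p l ih =>
    intro b hb
    simp only [List.foldl_cons]
    apply ih
    by_cases h1 : p.2.2.1 = ""
    · simpa [h1] using hb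
    · simp only [if_neg h1]
      rcases hg : b.get? p.2.2.1 with _ | cur <;> dsimp only
      · exact PySem.Dict.nodup_keys_insert _ _ _ hb
      · by_cases hcond : p.2.1 < cur.1 ∨ p.2.1 = cur.1 ∧ p.1 < cur.2.1
        · rw [if_pos hcond]; exact PySem.Dict.nodup_keys_insert _ _ _ hb
        · rw [if_neg hcond]; exact hb

-- the per-key fold is pvVal of the running argmin
lemma pvFold_val (d : String) (hd : d ≠ "") (l : List (Int × Int × String × String)) :
    ∀ (m : Option (Int × Int × String × String)),
    l.foldl (fun c p =>
        if pvDid p = "" ∨ pvDid p ≠ d then c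
        else match c with
          | none => some (pvVal p)
          | some cur =>
              if p.2.1 < cur.1 ∨ (p.2.1 = cur.1 ∧ p.1 < cur.2.1)
              then some (pvVal p) else cur) (m.map pvVal)
      = (l.foldl (fun c p =>
          if pvDid p ≠ d then c
          else match c with
            | none => some p
            | some q => if p.2.1 < q.2.1 ∨ (p.2.1 = q.2.1 ∧ p.1 < q.1) then some p else c) m).map pvVal := by
  induction l with
  | nil => intro m; rfl
  | cons p l ih =>
    intro m
    simp only [List.foldl_cons]
    by_cases h1 : pvDid p = d
    · have hne : ¬ (pvDid p = "" ∨ pvDid p ≠ d) := by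
        push_neg; exact ⟨h1 ▸ hd, h1⟩
      rw [if_neg hne, if_neg (by simpa using h1)]
      rcases m with _ | q
      · simpa using ih (some p)
      · simp only [Option.map_some]
        rw [show (pvVal q).1 = q.2.1 from rfl, show (pvVal q).2.1 = q.1 from rfl]
        by_cases hcond : p.2.1 < q.2.1 ∨ p.2.1 = q.2.1 ∧ p.1 < q.1
        · rw [if_pos hcond, if_pos hcond]
          simpa using ih (some p)
        · rw [if_neg hcond, if_neg hcond]
          simpa using ih (some q)
    · rw [if_pos (Or.inr h1), if_pos h1]
      exact ih m

lemma pvFold_empty (l : List (Int × Int × String × String)) :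
    ∀ c, l.foldl (fun c p =>
        if pvDid p = "" ∨ pvDid p ≠ "" then c
        else match c with
          | none => some (pvVal p)
          | some cur =>
              if p.2.1 < cur.1 ∨ (p.2.1 = cur.1 ∧ p.1 < cur.2.1)
              then some (pvVal p) else cur) c = c := by
  induction l with
  | nil => intro c; rfl
  | cons p l ih =>
    intro c
    simp only [List.foldl_cons]
    rw [if_pos (by rcases eq_or_ne (pvDid p) "" with h | h; exacts [Or.inl h, Or.inr h])]
    exact ih c

lemma pvAmin_append (l : List (Int × Int × String × String)) (p : Int × Int × String × String)
    (d : String) : pvAmin (l ++ [p]) d =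
    (if pvDid p ≠ d then pvAmin l d
     else match pvAmin l d with
       | none => some p
       | some q => if p.2.1 < q.2.1 ∨ (p.2.1 = q.2.1 ∧ p.1 < q.1) then some p else pvAmin l d) := by
  unfold pvAmin
  rw [List.foldl_append, List.foldl_cons, List.foldl_nil]

lemma pvAmin_none_iff (d : String) : ∀ (l : List (Int × Int × String × String)),
    pvAmin l d = none ↔ ∀ y ∈ l, pvDid y ≠ d := by
  intro l
  induction l using List.reverseRecOn with
  | nil => simp [pvAmin]
  | append_singleton l p ih =>
    rw [pvAmin_append]
    by_cases h1 : pvDid p = d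
    · rw [if_neg (by simp [h1])]
      constructor
      · intro h
        rcases hc : pvAmin l d with _ | q <;> rw [hc] at h <;> dsimp only at h
        · simp at h
        · split_ifs at h
      · intro h
        exact absurd h1 (h p (by simp))
    · rw [if_pos h1, ih]
      constructor
      · intro h y hy
        rcases List.mem_append.1 hy with hy | hy
        · exact h y hy
        · rw [List.mem_singleton.1 hy]; exact h1
      · intro h y hy
        exact h y (List.mem_append.2 (Or.inl hy))

lemma pvAmin_some_iff (d : String) (l : List (Int × Int × String × String))
    (hp : l.Pairwise (fun a b => a.1 < b.1)) (x : Int × Int × String × String) :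
    pvAmin l d = some x ↔ x ∈ l ∧ pvDid x = d ∧ ∀ y ∈ l, pvDid y = d → y = x ∨ pvLex x y := by
  revert hp
  induction l using List.reverseRecOn generalizing x with
  | nil => intro _; simp [pvAmin]
  | append_singleton l p ih =>
    intro hp
    rcases List.pairwise_append.1 hp with ⟨hl, -, hlt⟩
    have hltp : ∀ a ∈ l, a.1 < p.1 := fun a ha => hlt a ha p (by simp)
    rw [pvAmin_append]
    by_cases h1 : pvDid p = d
    · rw [if_neg (by simp [h1])]
      rcases hc : pvAmin l d with _ | q
      · dsimp only
        have hnone := (pvAmin_none_iff d l).1 hc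
        constructor
        · intro h
          obtain rfl : p = x := by simpa using h
          refine ⟨by simp, h1, ?_⟩
          intro y hy hdy
          rcases List.mem_append.1 hy with hy | hy
          · exact absurd hdy (hnone y hy)
          · exact Or.inl (List.mem_singleton.1 hy)
        · rintro ⟨hxl, hdx, hmin⟩
          rcases List.mem_append.1 hxl with hy | hy
          · exact absurd hdx (hnone x hy)
          · rw [List.mem_singleton.1 hy]
      · obtain ⟨hql, hqd, hqmin⟩ := (ih q hl).1 hc
        have hqp : q.1 < p.1 := hltp q hql
        dsimp only
        by_cases hcond : p.2.1 < q.2.1 ∨ (p.2.1 = q.2.1 ∧ p.1 < q.1)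
        · rw [if_pos hcond]
          constructor
          · intro h
            obtain rfl : p = x := by simpa using h
            refine ⟨by simp, h1, ?_⟩
            intro y hy hdy
            rcases List.mem_append.1 hy with hy | hy
            · rcases hqmin y hy hdy with rfl | hqy
              · exact Or.inr hcond
              · exact Or.inr (pvLex_trans hcond hqy)
            · exact Or.inl (List.mem_singleton.1 hy)
          · rintro ⟨hxl, hdx, hmin⟩
            by_cases hxp : x = p
            · rw [hxp]
            · exfalso
              have hxl' : x ∈ l := by
                rcases List.mem_append.1 hxl with h' | h'
                · exact h'
                · exact absurd (List.mem_singleton.1 h') hxp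
              rcases hmin p (by simp) h1 with h2 | h2
              · exact hxp h2.symm
              · rcases hqmin x hxl' hdx with rfl | h3
                · exact pvLex_asymm hcond h2
                · rcases hmin q (List.mem_append.2 (Or.inl hql)) hqd with rfl | h4
                  · exact pvLex_asymm h3 h3
                  · exact pvLex_asymm h3 h4
        · rw [if_neg hcond]
          have hqplex : pvLex q p := by unfold pvLex at *; omega
          constructor
          · intro h
            obtain rfl : q = x := by simpa using h
            refine ⟨List.mem_append.2 (Or.inl hql), hqd, ?_⟩
            intro y hy hdy
            rcases List.mem_append.1 hy with hy | hy
            · exact hqmin y hy hdy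
            · rw [List.mem_singleton.1 hy]; exact Or.inr hqplex
          · rintro ⟨hxl, hdx, hmin⟩
            have hxq : x = q := by
              by_cases hxp : x = p
              · subst hxp
                rcases hmin q (List.mem_append.2 (Or.inl hql)) hqd with h4 | h4
                · exfalso; rw [h4] at hqp; omega
                · exact absurd h4 hcond
              · have hxl' : x ∈ l := by
                  rcases List.mem_append.1 hxl with h' | h'
                  · exact h'
                  · exact absurd (List.mem_singleton.1 h') hxp
                rcases hqmin x hxl' hdx with rfl | h3
                · rfl
                · rcases hmin q (List.mem_append.2 (Or.inl hql)) hqd with h4 | h4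
                  · exact h4.symm
                  · exact absurd h4 (fun h4 => pvLex_asymm h3 h4)
            rw [hxq]
    · rw [if_pos h1, ih x hl]
      constructor
      · rintro ⟨hxl, hdx, hmin⟩
        refine ⟨List.mem_append.2 (Or.inl hxl), hdx, ?_⟩
        intro y hy hdy
        rcases List.mem_append.1 hy with hy | hy
        · exact hmin y hy hdy
        · exact absurd hdy (by rw [List.mem_singleton.1 hy]; exact h1)
      · rintro ⟨hxl, hdx, hmin⟩
        have hxl' : x ∈ l := by
          rcases List.mem_append.1 hxl with h' | h'
          · exact h'
          · exact absurd hdx (by rw [List.mem_singleton.1 h']; exact h1)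
        exact ⟨hxl', hdx, fun y hy hdy => hmin y (List.mem_append.2 (Or.inl hy)) hdy⟩

lemma pvMem_items_of_get? {κ ν : Type} [BEq κ] [LawfulBEq κ] (dd : PySem.Dict κ ν) (k : κ) (v : ν)
    (h : dd.get? k = some v) : (k, v) ∈ dd.items := by
  unfold PySem.Dict.get? at h
  rcases Option.map_eq_some_iff.1 h with ⟨p, hp, hv⟩
  have hpred : p.1 = k := by simpa using List.find?_some hp
  have hmem := List.mem_of_find?_eq_some hp
  rw [← hv, ← hpred]
  simpa using hmem

-- membership characterisations of both unique-entry lists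
lemma pvMem_best_iff (items : List (Int × String × String)) (d : String) (v : Int × Int × String) :
    (d, v) ∈ ((PySem.List.enumerate items 0).foldl
      (fun (b : PySem.Dict String (Int × Int × String)) p =>
        if p.2.2.1 = "" then b
        else match b.get? p.2.2.1 with
          | none => b.insert p.2.2.1 (p.2.1, p.1, if p.2.2.2 = "" then "" else p.2.2.2)
          | some cur =>
              if p.2.1 < cur.1 ∨ (p.2.1 = cur.1 ∧ p.1 < cur.2.1)
              then b.insert p.2.2.1 (p.2.1, p.1, if p.2.2.2 = "" then "" else p.2.2.2)
              else b) PySem.Dict.empty).items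
      ↔ ∃ x, pvBest items d x ∧ v = pvVal x := by
  have hnodup := pvDict_keys_nodup (PySem.List.enumerate items 0) PySem.Dict.empty
    (by simp [PySem.Dict.keys, PySem.Dict.empty])
  by_cases hd : d = ""
  · subst hd
    constructor
    · intro hmem
      have hget := PySem.Dict.get?_of_mem_items _ hmem hnodup
      rw [pvDict_get?_fold, PySem.Dict.get?_empty] at hget
      have hnone := pvFold_empty (PySem.List.enumerate items 0) none
      exact absurd (hnone.symm.trans hget) (by simp)
    · rintro ⟨x, hbx, -⟩
      exact absurd rfl hbx.2.2.1
  · have hgetamin : ((PySem.List.enumerate items 0).foldl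
        (fun (b : PySem.Dict String (Int × Int × String)) p =>
          if p.2.2.1 = "" then b
          else match b.get? p.2.2.1 with
            | none => b.insert p.2.2.1 (p.2.1, p.1, if p.2.2.2 = "" then "" else p.2.2.2)
            | some cur =>
                if p.2.1 < cur.1 ∨ (p.2.1 = cur.1 ∧ p.1 < cur.2.1)
                then b.insert p.2.2.1 (p.2.1, p.1, if p.2.2.2 = "" then "" else p.2.2.2)
                else b) PySem.Dict.empty).get? d
        = (pvAmin (PySem.List.enumerate items 0) d).map pvVal := by
      rw [pvDict_get?_fold, PySem.Dict.get?_empty]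
      unfold pvAmin
      simpa using pvFold_val d hd (PySem.List.enumerate items 0) none
    constructor
    · intro hmem
      have hget := PySem.Dict.get?_of_mem_items _ hmem hnodup
      rw [hgetamin] at hget
      rcases hx : pvAmin (PySem.List.enumerate items 0) d with _ | x <;> rw [hx] at hget
      · exact absurd hget (by simp)
      · obtain ⟨h1, h2, h3⟩ := (pvAmin_some_iff d _ (pvTg_pairwise items) x).1 hx
        exact ⟨x, ⟨h1, h2, hd, h3⟩, (Option.some.inj hget).symm⟩
    · rintro ⟨x, ⟨hx1, hx2, -, hx4⟩, rfl⟩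
      have hx : pvAmin (PySem.List.enumerate items 0) d = some x :=
        (pvAmin_some_iff d _ (pvTg_pairwise items) x).2 ⟨hx1, hx2, hx4⟩
      have hget : _ = some (pvVal x) := hgetamin.trans (by rw [hx]; rfl)
      exact pvMem_items_of_get? _ _ _ hget

lemma pvMem_E_iff (items : List (Int × String × String)) (d : String) (v : Int × Int × String) :
    (d, v) ∈ pvE items ↔ ∃ x, pvBest items d x ∧ v = pvVal x := by
  unfold pvE
  rw [List.mem_map]
  constructor
  · rintro ⟨x, hx, hpair⟩
    have hdv : pvDid x = d ∧ pvVal x = v := by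
      constructor
      · exact congrArg Prod.fst hpair
      · exact congrArg Prod.snd hpair
    obtain ⟨hxl, hne, -, hmin⟩ := (pvKf_mem_iff _ (pvLexS_pairwise items) [] x).1 hx
    refine ⟨x, ⟨(PySem.List.mem_sorted _ _ _ _).1 hxl, hdv.1, hdv.1 ▸ hne, ?_⟩, hdv.2.symm⟩
    intro y hy hdy
    exact hmin y ((PySem.List.mem_sorted _ _ _ _).2 hy) (by rw [hdy, hdv.1])
  · rintro ⟨x, ⟨hx1, hx2, hx3, hx4⟩, rfl⟩
    refine ⟨x, ?_, by rw [hx2]⟩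
    apply (pvKf_mem_iff _ (pvLexS_pairwise items) [] x).2
    refine ⟨(PySem.List.mem_sorted _ _ _ _).2 hx1, hx2 ▸ hx3, by simp, ?_⟩
    intro y hy hdy
    exact hx4 y ((PySem.List.mem_sorted _ _ _ _).1 hy) (hdy.trans hx2)

-- the sorted unique entries are exactly pvE
lemma pvEntries_eq (items : List (Int × String × String)) :
    PySem.List.sorted2 ((PySem.List.enumerate items 0).foldl
      (fun (b : PySem.Dict String (Int × Int × String)) p =>
        if p.2.2.1 = "" then b
        else match b.get? p.2.2.1 with
          | none => b.insert p.2.2.1 (p.2.1, p.1, if p.2.2.2 = "" then "" else p.2.2.2)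
          | some cur =>
              if p.2.1 < cur.1 ∨ (p.2.1 = cur.1 ∧ p.1 < cur.2.1)
              then b.insert p.2.2.1 (p.2.1, p.1, if p.2.2.2 = "" then "" else p.2.2.2)
              else b) PySem.Dict.empty).items
      (fun kv => kv.2.1) (fun kv => kv.2.2.1) false = pvE items := by
  have hbound : ∀ a ∈ ((PySem.List.enumerate items 0).foldl
      (fun (b : PySem.Dict String (Int × Int × String)) p =>
        if p.2.2.1 = "" then b
        else match b.get? p.2.2.1 with
          | none => b.insert p.2.2.1 (p.2.1, p.1, if p.2.2.2 = "" then "" else p.2.2.2)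
          | some cur =>
              if p.2.1 < cur.1 ∨ (p.2.1 = cur.1 ∧ p.1 < cur.2.1)
              then b.insert p.2.2.1 (p.2.1, p.1, if p.2.2.2 = "" then "" else p.2.2.2)
              else b) PySem.Dict.empty).items,
      0 ≤ a.2.2.1 ∧ a.2.2.1 < (items.length : Int) := by
    intro a ha
    obtain ⟨x, hbx, hv⟩ := (pvMem_best_iff items a.1 a.2).1 (by simpa using ha)
    have hb := pvTg_ix_bound items x hbx.1
    rw [hv]
    exact hb
  have h0 : PySem.List.sorted2 ((PySem.List.enumerate items 0).foldl
      (fun (b : PySem.Dict String (Int × Int × String)) p =>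
        if p.2.2.1 = "" then b
        else match b.get? p.2.2.1 with
          | none => b.insert p.2.2.1 (p.2.1, p.1, if p.2.2.2 = "" then "" else p.2.2.2)
          | some cur =>
              if p.2.1 < cur.1 ∨ (p.2.1 = cur.1 ∧ p.1 < cur.2.1)
              then b.insert p.2.2.1 (p.2.1, p.1, if p.2.2.2 = "" then "" else p.2.2.2)
              else b) PySem.Dict.empty).items (fun kv => kv.2.1) (fun kv => kv.2.2.1) false
      = ((PySem.List.enumerate items 0).foldl
      (fun (b : PySem.Dict String (Int × Int × String)) p =>
        if p.2.2.1 = "" then b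
        else match b.get? p.2.2.1 with
          | none => b.insert p.2.2.1 (p.2.1, p.1, if p.2.2.2 = "" then "" else p.2.2.2)
          | some cur =>
              if p.2.1 < cur.1 ∨ (p.2.1 = cur.1 ∧ p.1 < cur.2.1)
              then b.insert p.2.2.1 (p.2.1, p.1, if p.2.2.2 = "" then "" else p.2.2.2)
              else b) PySem.Dict.empty).items.foldl
        (fun acc x => PySem.List.insertBy
          (fun a b => decide (a.2.1 < b.2.1) || (!decide (b.2.1 < a.2.1) && decide (a.2.2.1 < b.2.2.1)))
          x acc) [] := rfl
  rw [h0]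
  rw [pvFoldl_insertBy_congr
    (fun a b => decide (a.2.1 < b.2.1) || (!decide (b.2.1 < a.2.1) && decide (a.2.2.1 < b.2.2.1)))
    (fun a b => decide (pvKkv ((items.length : Int) + 1) a < pvKkv ((items.length : Int) + 1) b))
    _ [] ?hagree]
  case hagree =>
    intro a ha b hb
    have hb' := hb.resolve_right List.not_mem_nil
    have ba := hbound a ha
    have bb := hbound b hb'
    rw [Bool.eq_iff_iff]
    simp only [Bool.or_eq_true, Bool.and_eq_true, Bool.not_eq_eq_eq_not, Bool.not_true,
      decide_eq_true_eq, decide_eq_false_iff_not]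
    unfold pvKkv
    rw [pvKlt_iff _ _ _ _ _ ba.1 (by omega) bb.1 (by omega)]
    omega
  rw [← PySem.List.sorted_eq_foldl_insertBy]
  apply PySem.List.sorted_eq_of_perm_of_pairwise_lt
  · -- pvE is a permutation of the dict's entry list
    have hnodupBI : ((PySem.List.enumerate items 0).foldl
        (fun (b : PySem.Dict String (Int × Int × String)) p =>
          if p.2.2.1 = "" then b
          else match b.get? p.2.2.1 with
            | none => b.insert p.2.2.1 (p.2.1, p.1, if p.2.2.2 = "" then "" else p.2.2.2)
            | some cur =>
                if p.2.1 < cur.1 ∨ (p.2.1 = cur.1 ∧ p.1 < cur.2.1)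
                then b.insert p.2.2.1 (p.2.1, p.1, if p.2.2.2 = "" then "" else p.2.2.2)
                else b) PySem.Dict.empty).items.Nodup := by
      apply List.Nodup.of_map Prod.fst
      exact pvDict_keys_nodup (PySem.List.enumerate items 0) PySem.Dict.empty
        (by simp [PySem.Dict.keys, PySem.Dict.empty])
    have hnodupE : (pvE items).Nodup := by
      apply List.Nodup.of_map Prod.fst
      have : (pvE items).map Prod.fst = (pvKf (pvLexS items) []).map pvDid := by
        simp [pvE, List.map_map, Function.comp]
      rw [this]
      exact pvKf_did_nodup (pvLexS items) []
    apply (List.perm_ext_iff_of_nodup hnodupE hnodupBI).2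
    rintro ⟨d0, v0⟩
    rw [pvMem_E_iff]
    exact (pvMem_best_iff items d0 v0).symm
  · -- pvE is strictly increasing in the combined key
    have hpw : (pvKf (pvLexS items) []).Pairwise pvLex :=
      List.Pairwise.sublist (pvKf_sublist (pvLexS items) []) (pvLexS_pairwise items)
    unfold pvE
    rw [List.pairwise_map]
    refine hpw.imp_of_mem ?_
    intro a b ha hb hab
    have hba := pvTg_ix_bound items a
      ((PySem.List.mem_sorted _ _ _ _).1 ((pvKf_sublist (pvLexS items) []).subset ha))
    have hbb := pvTg_ix_bound items b
      ((PySem.List.mem_sorted _ _ _ _).1 ((pvKf_sublist (pvLexS items) []).subset hb))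
    show pvKkv _ (pvDid a, pvVal a) < pvKkv _ (pvDid b, pvVal b)
    unfold pvKkv pvVal pvLex at *
    dsimp only
    rw [pvKlt_iff _ _ _ _ _ hba.1 (by omega) hbb.1 (by omega)]
    omega

theorem merge_dedup_ranking_spec : Claim_equal_merge_dedup_ranking := by
  intro items _
  show merge_dedup_ranking items = merge_dedup_ranking_alt items
  have hA : merge_dedup_ranking items =
      ((pvKf (pvLexS items) []).map pvDid,
       (pvKf (pvLexS items) []).map (fun p => if p.2.2.2 = "" then "" else p.2.2.2)) := by
    simp only [merge_dedup_ranking]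
    rw [← pvStability items, List.foldl_map]
    have h := pvA_fold (pvLexS items) PySem.Set.empty [] []
    simpa using congrArg (fun st => (st.2.1, st.2.2)) h
  have hB : merge_dedup_ranking_alt items =
      ((pvKf (pvLexS items) []).map pvDid,
       (pvKf (pvLexS items) []).map (fun p => if p.2.2.2 = "" then "" else p.2.2.2)) := by
    simp only [merge_dedup_ranking_alt]
    rw [pvEntries_eq items]
    simp [pvE, List.map_map, Function.comp, pvDid, pvVal]
  rw [hA, hB]
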